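-- pv_equiv track=rewrite | github.com/carlos-a-g-h/helper-scripts-for-working-with-dependencies | main.py | util_get_excluded
-- ===== SOURCE A (Python) =====
-- _EXC_MODE_DEFAULT=0
--
-- _EXC_MODE_INCLUDE_ALL=1
--
-- _EXC_MODE_EXCLUDE_DEFAULTS=2
--
-- _EXC_SWITCH_INC_ALL="all"
--
-- _EXC_SWITCH_EXC_DEF="-"
--
-- def util_get_excluded(candidates:list)->list:
--
-- 	selected=[]
-- 	exc_mode=_EXC_MODE_DEFAULT
-- 	for arg in candidates:
-- 		arg_ok=arg.strip()
-- 		if exc_mode==_EXC_MODE_DEFAULT: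
-- 			if arg_ok.lower()==_EXC_SWITCH_INC_ALL:
-- 				exc_mode=_EXC_MODE_INCLUDE_ALL
-- 			if arg_ok==_EXC_SWITCH_EXC_DEF:
-- 				exc_mode=_EXC_MODE_EXCLUDE_DEFAULTS
-- 				continue
-- 		selected.append(arg_ok)
--
-- 	return selected
-- ===== SOURCE B (Python) =====
-- def util_get_excluded(candidates: list) -> list:
--     stripped = [a.strip() for a in candidates]
--     for i, s in enumerate(stripped):
--         if s == "-":
--             return stripped[:i] + stripped[i + 1:]
--         if s.lower() == "all":
--             return stripped
--     return stripped
-- ===== Notes on version B (the rewrite author's own statement) =====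
-- stated objective: simpler
-- what changed: Replaces the mode-flag accumulator state machine with a two-phase construction: strip everything first, then locate the first pivot ('-' or 'all') and return the stripped list with at most that one '-' sliced out.
import Mathlib
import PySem

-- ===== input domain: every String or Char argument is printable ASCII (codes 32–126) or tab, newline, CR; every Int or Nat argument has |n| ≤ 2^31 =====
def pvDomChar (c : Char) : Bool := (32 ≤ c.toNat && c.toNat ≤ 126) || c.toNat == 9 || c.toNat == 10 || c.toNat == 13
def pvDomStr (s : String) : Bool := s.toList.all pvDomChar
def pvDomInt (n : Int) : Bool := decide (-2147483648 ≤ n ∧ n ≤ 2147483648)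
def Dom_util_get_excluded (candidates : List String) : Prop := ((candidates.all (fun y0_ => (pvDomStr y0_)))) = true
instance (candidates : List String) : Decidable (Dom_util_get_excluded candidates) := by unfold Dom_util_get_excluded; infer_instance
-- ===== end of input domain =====

-- B replaces A's mode-flag accumulator state machine with a simpler two-phase
-- construction: strip all args, then slice out at most the first '-' pivot.

-- ===== PORT A =====
-- A's loop: accumulator `selected`, mode flag; in default mode 'all' (case-insensitive)
-- switches mode, '-' switches mode and is skipped (continue).
def utilA_loop (candidates : List String) (selected : List String) (exc_mode : Int) : List String :=
  match candidates with
  | [] => selected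
  | arg :: rest =>
    let arg_ok := PySem.Str.strip arg
    if exc_mode = 0 then
      let exc_mode1 := if PySem.Str.lower arg_ok = "all" then (1 : Int) else exc_mode
      if arg_ok = "-" then utilA_loop rest selected 2
      else utilA_loop rest (selected ++ [arg_ok]) exc_mode1
    else utilA_loop rest (selected ++ [arg_ok]) exc_mode

def util_get_excluded (candidates : List String) : List String :=
  utilA_loop candidates [] 0

-- ===== PORT B =====
-- B's scan over the pre-stripped list: find the first pivot; '-' → slice it out, 'all' → whole list.
def utilB_scan (stripped : List String) (i : Nat) (full : List String) : List String :=
  match stripped with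
  | [] => full
  | s :: rest =>
    if s = "-" then full.take i ++ full.drop (i + 1)
    else if PySem.Str.lower s = "all" then full
    else utilB_scan rest (i + 1) full

def util_get_excluded_alt (candidates : List String) : List String :=
  let stripped := candidates.map PySem.Str.strip
  utilB_scan stripped 0 stripped

-- ===== PRECONDITION & SPEC =====
def Spec_util_get_excluded (candidates : List String) (out : List String) : Prop := out = util_get_excluded_alt candidates
instance (candidates : List String) (out : List String) : Decidable (Spec_util_get_excluded candidates out) := by unfold Spec_util_get_excluded; infer_instance

-- ===== CLAIM (what is proved, stated in full; the proofs are below) =====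
def Claim_equal_util_get_excluded : Prop := ∀ (candidates : List String), Dom_util_get_excluded candidates → Spec_util_get_excluded candidates (util_get_excluded candidates)

-- ===== LEMMAS AND PROOFS =====

-- once the mode flag is nonzero, A just appends every stripped arg
theorem utilA_loop_nonzero (c : List String) : ∀ (sel : List String) (m : Int), m ≠ 0 →
    utilA_loop c sel m = sel ++ c.map PySem.Str.strip := by
  induction c with
  | nil => intro sel m _; simp [utilA_loop]
  | cons a rest ih =>
    intro sel m hm
    simp only [utilA_loop, if_neg hm, List.map_cons]
    rw [ih _ m hm, List.append_assoc]; rfl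

theorem utilA_loop_zero (c : List String) : ∀ (pre : List String),
    utilA_loop c pre 0 = utilB_scan (c.map PySem.Str.strip) pre.length (pre ++ c.map PySem.Str.strip) := by
  induction c with
  | nil => intro pre; simp [utilA_loop, utilB_scan]
  | cons a rest ih =>
    intro pre
    simp only [utilA_loop, List.map_cons, utilB_scan]
    by_cases hd : PySem.Str.strip a = "-"
    · rw [if_pos hd, utilA_loop_nonzero rest pre 2 (by decide)]
      simp [hd]
    · rw [if_neg hd, if_neg hd]
      by_cases ha : PySem.Str.lower (PySem.Str.strip a) = "all"
      · rw [if_pos ha, if_pos ha, utilA_loop_nonzero rest (pre ++ [PySem.Str.strip a]) 1 (by decide)]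
        simp [List.append_assoc]
      · rw [if_neg ha, if_neg ha, ih (pre ++ [PySem.Str.strip a])]
        simp [List.append_assoc]

-- ===== VERDICT (by name: the statement is the Claim_ definition above) =====
theorem util_get_excluded_spec : Claim_equal_util_get_excluded := by
  intro c _
  show util_get_excluded c = util_get_excluded_alt c
  simpa [util_get_excluded, util_get_excluded_alt] using utilA_loop_zero c []
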